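-- pv_equiv track=rewrite | github.com/libp2p/py-libp2p | libp2p/transport/webrtc/private_to_public/util.py | get_ice_credentials_from_sdp
-- ===== SOURCE A (Python) =====
-- def get_ice_credentials_from_sdp(sdp: str | None) -> tuple[str | None, str | None]:
--     """Extract ice-ufrag and ice-pwd from SDP. Returns (ufrag, ice_pwd)."""
--     if not sdp:
--         return None, None
--     ufrag, ice_pwd = None, None
--     for line in sdp.splitlines():
--         if line.startswith("a=ice-ufrag:"):
--             ufrag = line.split(":", 1)[1].strip()
--         elif line.startswith("a=ice-pwd:"):
--             ice_pwd = line.split(":", 1)[1].strip()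
--     return ufrag, ice_pwd
-- ===== SOURCE B (Python) =====
-- def get_ice_credentials_from_sdp(sdp):
--     """Extract ice-ufrag and ice-pwd from SDP. Returns (ufrag, ice_pwd)."""
--     if not sdp:
--         return None, None
--     attrs = {}
--     for line in sdp.splitlines():
--         parts = line.split(":", 1)
--         if len(parts) == 2:
--             attrs[parts[0]] = parts[1].strip()
--     return attrs.get("a=ice-ufrag"), attrs.get("a=ice-pwd")
-- ===== Notes on version B (the rewrite author's own statement) =====
-- stated objective: alternative
-- what changed: B builds an attribute dict in one pass by splitting each line at its first colon into key and value (later occurrences overwrite earlier ones) and then answers with two dict lookups, replacing A's two per-line prefix-test branches.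
import Mathlib
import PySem

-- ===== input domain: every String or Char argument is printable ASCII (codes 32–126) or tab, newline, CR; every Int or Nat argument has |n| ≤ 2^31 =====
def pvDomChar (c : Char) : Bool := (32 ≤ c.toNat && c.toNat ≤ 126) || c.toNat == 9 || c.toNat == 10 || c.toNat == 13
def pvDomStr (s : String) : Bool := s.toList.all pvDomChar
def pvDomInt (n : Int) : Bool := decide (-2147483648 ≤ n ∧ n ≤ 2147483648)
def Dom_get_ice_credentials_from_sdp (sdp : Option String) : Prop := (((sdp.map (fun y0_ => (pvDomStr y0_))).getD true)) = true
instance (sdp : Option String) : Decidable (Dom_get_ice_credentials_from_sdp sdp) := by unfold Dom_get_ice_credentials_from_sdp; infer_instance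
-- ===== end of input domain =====

-- B parses the SDP into an attribute dict (one split-on-first-colon pass, last occurrence wins)
-- followed by two lookups, instead of A's two prefix-test branches inside the loop; alternative
-- decomposition, same cost.

-- ===== PORT A =====
-- line.split(":", 1)[1].strip() — splitMax? is total here (sep ≠ ""); the .getD defaults are never
-- reached on the guarded branches (the line is known to contain a ':')
def pvSplitVal (line : String) : String :=
  PySem.Str.strip ((PySem.List.pyGet? ((PySem.Str.splitMax? line ":" 1).getD []) 1).getD "")

def get_ice_credentials_from_sdp (sdp : Option String) : Option String × Option String :=
  match sdp with
  | none => (none, none)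
  | some s =>
    if s = "" then (none, none)    -- 'if not sdp' on a str
    else
      (PySem.Str.splitlines s).foldl
        (fun (st : Option String × Option String) line =>
          if PySem.Str.startswith line "a=ice-ufrag:" then (some (pvSplitVal line), st.2)
          else if PySem.Str.startswith line "a=ice-pwd:" then (st.1, some (pvSplitVal line))
          else st)
        (none, none)

-- ===== PORT B =====
def get_ice_credentials_from_sdp_alt (sdp : Option String) : Option String × Option String :=
  match sdp with
  | none => (none, none)
  | some s =>
    if s = "" then (none, none)
    else
      let d := (PySem.Str.splitlines s).foldl
        (fun (d : PySem.Dict String String) line =>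
          match (PySem.Str.splitMax? line ":" 1).getD [] with
          | [k, v] => d.insert k (PySem.Str.strip v)    -- len(parts) == 2
          | _ => d)
        PySem.Dict.empty
      (d.get? "a=ice-ufrag", d.get? "a=ice-pwd")

-- ===== PRECONDITION & SPEC =====
def Spec_get_ice_credentials_from_sdp (sdp : Option String) (out : Option String × Option String) : Prop := out = get_ice_credentials_from_sdp_alt sdp
instance (sdp : Option String) (out : Option String × Option String) : Decidable (Spec_get_ice_credentials_from_sdp sdp out) := by unfold Spec_get_ice_credentials_from_sdp; infer_instance

-- ===== CLAIM (what is proved, stated in full; the proofs are below) =====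
def Claim_equal_get_ice_credentials_from_sdp : Prop := ∀ (sdp : Option String), Dom_get_ice_credentials_from_sdp sdp → Spec_get_ice_credentials_from_sdp sdp (get_ice_credentials_from_sdp sdp)

-- ===== LEMMAS AND PROOFS =====

-- once maxsplit is exhausted the rest of the string is one final piece
theorem pv_go_zero (fuel : Nat) (l cur : List Char) (acc : List (List Char)) :
    PySem.Chars.splitOnMax.go [':'] fuel 0 l cur acc = ((cur.reverse ++ l) :: acc).reverse := by
  cases fuel with
  | zero => rfl
  | succ f => cases l with
    | nil => simp [PySem.Chars.splitOnMax.go]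
    | cons c rest => simp [PySem.Chars.splitOnMax.go]

-- characterisation of split(":", 1) at the Chars level
theorem pv_go_one (l : List Char) : ∀ (fuel : Nat) (cur : List Char) (acc : List (List Char)),
    l.length < fuel →
    PySem.Chars.splitOnMax.go [':'] fuel 1 l cur acc =
      (if ':' ∈ l then
        acc.reverse ++ [cur.reverse ++ l.takeWhile (· ≠ ':'), (l.dropWhile (· ≠ ':')).tail]
       else acc.reverse ++ [cur.reverse ++ l]) := by
  induction l with
  | nil =>
    intro fuel cur acc h
    cases fuel with
    | zero => omega
    | succ f => simp [PySem.Chars.splitOnMax.go]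
  | cons c rest ih =>
    intro fuel cur acc h
    cases fuel with
    | zero => simp at h
    | succ f =>
      simp only [PySem.Chars.splitOnMax.go]
      rw [if_neg one_ne_zero]
      by_cases hc : c = ':'
      · subst hc
        simp only [List.isPrefixOf, BEq.rfl, Bool.true_and, if_pos]
        rw [pv_go_zero]
        simp
      · have hpre : [':'].isPrefixOf (c :: rest) = false := by
          simp [List.isPrefixOf]
          exact fun h' => hc h'.symm
        rw [hpre]
        simp only [Bool.false_eq_true, if_false]
        rw [ih f (c :: cur) acc (by simp at h ⊢; omega)]
        have hc' : ¬(':' = c) := fun h' => hc h'.symm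
        simp [hc, hc']

theorem pv_split1 (l : List Char) :
    PySem.Chars.splitOnMax l [':'] 1 =
      (if ':' ∈ l then [l.takeWhile (· ≠ ':'), (l.dropWhile (· ≠ ':')).tail] else [l]) := by
  unfold PySem.Chars.splitOnMax
  rw [if_neg (by norm_num)]
  have h1 : (1 : Int).toNat = 1 := rfl
  rw [h1, pv_go_one l (l.length + 1) [] [] (by omega)]
  split <;> simp

-- a line starts with "<p>:" (p colon-free) iff it contains a colon and p is exactly its pre-colon part
theorem pv_prefix_iff : ∀ (p : List Char), ':' ∉ p → ∀ (l : List Char),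
    ((p ++ [':']).isPrefixOf l = true ↔ ':' ∈ l ∧ l.takeWhile (· ≠ ':') = p) := by
  intro p
  induction p with
  | nil =>
    intro _ l
    cases l with
    | nil => simp
    | cons c t =>
      by_cases hc : c = ':'
      · subst hc; simp [List.isPrefixOf]
      · have hc' : ¬(':' = c) := fun h => hc h.symm
        simp [List.isPrefixOf, hc, hc']
  | cons a p' ih =>
    intro hp l
    have ha : a ≠ ':' := fun h => hp (h ▸ List.mem_cons_self ..)
    have hp' : ':' ∉ p' := fun h => hp (List.mem_cons_of_mem _ h)
    cases l with
    | nil => simp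
    | cons c t =>
      by_cases hc : c = a
      · subst hc
        simp only [List.cons_append, List.isPrefixOf, BEq.rfl, Bool.true_and]
        rw [ih hp' t, List.mem_cons, List.takeWhile_cons,
          if_pos (by simpa using ha)]
        have ha' : ¬(':' = c) := fun h => ha h.symm
        simp [ha']
      · have hac : (a == c) = false := by
          simp only [beq_eq_false_iff_ne]; exact fun h => hc h.symm
        simp only [List.cons_append, List.isPrefixOf, hac, Bool.false_and,
          Bool.false_eq_true, false_iff, not_and]
        intro _ ht
        rw [List.takeWhile_cons] at ht
        by_cases hcc : c = ':'
        · simp [hcc] at ht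
        · rw [if_pos (by simpa using hcc)] at ht
          simp only [List.cons.injEq] at ht
          exact hc ht.1

-- what line.split(":", 1) evaluates to, at the String level
theorem pv_parts (line : String) :
    (PySem.Str.splitMax? line ":" 1).getD [] =
      (if ':' ∈ line.toList then
        [String.ofList (line.toList.takeWhile (· ≠ ':')),
         String.ofList ((line.toList.dropWhile (· ≠ ':')).tail)]
       else [String.ofList line.toList]) := by
  have : (":" : String).toList = [':'] := rfl
  simp only [PySem.Str.splitMax?, this, PySem.Chars.splitMax?]
  rw [if_neg (by simp)]
  rw [pv_split1]
  split <;> simp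

theorem pv_startswith (p : List Char) (hp : ':' ∉ p) (pre line : String)
    (hpre : pre.toList = p ++ [':']) :
    (PySem.Str.startswith line pre = true ↔
      ':' ∈ line.toList ∧ line.toList.takeWhile (· ≠ ':') = p) := by
  rw [PySem.Str.startswith_eq, PySem.Chars.startswith, hpre, pv_prefix_iff p hp]

-- one line of the loop: A's per-line state update equals B's dict update, viewed through the two lookups
theorem pv_step (line : String) (d : PySem.Dict String String) :
    (let d2 := (match (PySem.Str.splitMax? line ":" 1).getD [] with
                | [k, v] => d.insert k (PySem.Str.strip v)
                | _ => d)
     ((if PySem.Str.startswith line "a=ice-ufrag:" then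
         (some (pvSplitVal line), d.get? "a=ice-pwd")
       else if PySem.Str.startswith line "a=ice-pwd:" then
         (d.get? "a=ice-ufrag", some (pvSplitVal line))
       else (d.get? "a=ice-ufrag", d.get? "a=ice-pwd"))
      = (d2.get? "a=ice-ufrag", d2.get? "a=ice-pwd"))) := by
  have hUF := pv_startswith "a=ice-ufrag".toList (by decide) "a=ice-ufrag:" line (by decide)
  have hPW := pv_startswith "a=ice-pwd".toList (by decide) "a=ice-pwd:" line (by decide)
  by_cases h1 : PySem.Str.startswith line "a=ice-ufrag:" = true
  · obtain ⟨hcol, htake⟩ := hUF.mp h1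
    have hparts : (PySem.Str.splitMax? line ":" 1).getD [] =
        ["a=ice-ufrag", String.ofList ((line.toList.dropWhile (· ≠ ':')).tail)] := by
      rw [pv_parts, if_pos hcol, htake]; simp
    have hval : pvSplitVal line =
        PySem.Str.strip (String.ofList ((line.toList.dropWhile (· ≠ ':')).tail)) := by
      unfold pvSplitVal
      rw [hparts]
      simp [PySem.List.pyGet?, PySem.List.pyIdx?]
    simp only [hparts, h1, if_pos, hval]
    rw [PySem.Dict.get?_insert_self, PySem.Dict.get?_insert_of_ne _ _ (by decide)]
  · by_cases h2 : PySem.Str.startswith line "a=ice-pwd:" = true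
    · obtain ⟨hcol, htake⟩ := hPW.mp h2
      have hparts : (PySem.Str.splitMax? line ":" 1).getD [] =
          ["a=ice-pwd", String.ofList ((line.toList.dropWhile (· ≠ ':')).tail)] := by
        rw [pv_parts, if_pos hcol, htake]; simp
      have hval : pvSplitVal line =
          PySem.Str.strip (String.ofList ((line.toList.dropWhile (· ≠ ':')).tail)) := by
        unfold pvSplitVal
        rw [hparts]
        simp [PySem.List.pyGet?, PySem.List.pyIdx?]
      simp only [hparts, h1, h2, if_pos, Bool.false_eq_true, if_false, hval]
      rw [PySem.Dict.get?_insert_self, PySem.Dict.get?_insert_of_ne _ _ (by decide)]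
    · simp only [h1, h2, Bool.false_eq_true, if_false]
      by_cases hcol : ':' ∈ line.toList
      · have hparts : (PySem.Str.splitMax? line ":" 1).getD [] =
            [String.ofList (line.toList.takeWhile (· ≠ ':')),
             String.ofList ((line.toList.dropWhile (· ≠ ':')).tail)] := by
          rw [pv_parts, if_pos hcol]
        have hk1 : String.ofList (line.toList.takeWhile (· ≠ ':')) ≠ "a=ice-ufrag" := by
          intro h
          exact h1 (hUF.mpr ⟨hcol, by
            have := congrArg String.toList h
            simpa using this⟩)
        have hk2 : String.ofList (line.toList.takeWhile (· ≠ ':')) ≠ "a=ice-pwd" := by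
          intro h
          exact h2 (hPW.mpr ⟨hcol, by
            have := congrArg String.toList h
            simpa using this⟩)
        simp only [hparts]
        rw [PySem.Dict.get?_insert_of_ne _ _ (Ne.symm hk1),
            PySem.Dict.get?_insert_of_ne _ _ (Ne.symm hk2)]
      · have hparts : (PySem.Str.splitMax? line ":" 1).getD [] =
            [String.ofList line.toList] := by rw [pv_parts, if_neg hcol]
        simp only [hparts]

theorem pv_fold (lines : List String) : ∀ (d : PySem.Dict String String),
    lines.foldl
      (fun (st : Option String × Option String) line =>
        if PySem.Str.startswith line "a=ice-ufrag:" then (some (pvSplitVal line), st.2)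
        else if PySem.Str.startswith line "a=ice-pwd:" then (st.1, some (pvSplitVal line))
        else st)
      (d.get? "a=ice-ufrag", d.get? "a=ice-pwd") =
    (let d' := lines.foldl
        (fun (d : PySem.Dict String String) line =>
          match (PySem.Str.splitMax? line ":" 1).getD [] with
          | [k, v] => d.insert k (PySem.Str.strip v)
          | _ => d) d
     (d'.get? "a=ice-ufrag", d'.get? "a=ice-pwd")) := by
  induction lines with
  | nil => intro d; rfl
  | cons line rest ih =>
    intro d
    simp only [List.foldl_cons]
    rw [pv_step line d]
    exact ih _

-- ===== VERDICT (by name: the statement is the Claim_ definition above) =====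
theorem get_ice_credentials_from_sdp_spec : Claim_equal_get_ice_credentials_from_sdp := by
  unfold Claim_equal_get_ice_credentials_from_sdp
  intro sdp _
  unfold Spec_get_ice_credentials_from_sdp
  unfold get_ice_credentials_from_sdp get_ice_credentials_from_sdp_alt
  match sdp with
  | none => rfl
  | some s =>
    by_cases hs : s = ""
    · simp [hs]
    · simp only [hs, if_false]
      have h0 : ((none, none) : Option String × Option String) =
          ((PySem.Dict.empty : PySem.Dict String String).get? "a=ice-ufrag",
           (PySem.Dict.empty : PySem.Dict String String).get? "a=ice-pwd") := rfl
      rw [h0, pv_fold]
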